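-- pv_equiv track=rewrite | github.com/mmmmosca/theta-lang | src/fastpaths.py | cy_parse_guarded_return
-- ===== SOURCE A (Python) =====
-- def cy_parse_guarded_return(expr: str):
--     # Parse 'X when Y' at top level (no 'else'), respecting quotes/brackets.
--     # Returns (left_expr, cond_expr) or (None, None) if no top-level ' when ' found.
--     depth_round = 0
--     depth_sq = 0
--     depth_curly = 0
--     in_sq = False
--     in_dq = False
--     i = 0
--     L = len(expr)
--     idx_when = -1
--     while i < L:
--         ch = expr[i]
--         if ch == "'" and not in_dq:
--             in_sq = not in_sq
--             i += 1
--             continue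
--         if ch == '"' and not in_sq:
--             in_dq = not in_dq
--             i += 1
--             continue
--         if not in_sq and not in_dq:
--             if ch == '(':
--                 depth_round += 1
--             elif ch == ')':
--                 depth_round -= 1
--             elif ch == '[':
--                 depth_sq += 1
--             elif ch == ']':
--                 depth_sq -= 1
--             elif ch == '{':
--                 depth_curly += 1
--             elif ch == '}':
--                 depth_curly -= 1
--             if depth_round == 0 and depth_sq == 0 and depth_curly == 0:
--                 if expr.startswith(' when ', i):
--                     idx_when = i
--                     break
--         i += 1
--     if idx_when == -1:
--         return None, None
--     left = expr[:idx_when].strip()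
--     cond = expr[idx_when + len(' when '):].strip()
--     return left, cond
-- ===== SOURCE B (Python) =====
-- def _is_top_level(expr, p):
--     # scan the prefix expr[:p] with the quote/bracket rules; p is top-level
--     # iff all depths are zero and we are outside both quote kinds
--     dr = ds = dc = 0
--     sq = dq = False
--     for ch in expr[:p]:
--         if ch == "'" and not dq:
--             sq = not sq
--         elif ch == '"' and not sq:
--             dq = not dq
--         elif not sq and not dq:
--             if ch == '(':
--                 dr += 1
--             elif ch == ')':
--                 dr -= 1
--             elif ch == '[':
--                 ds += 1
--             elif ch == ']':
--                 ds -= 1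
--             elif ch == '{':
--                 dc += 1
--             elif ch == '}':
--                 dc -= 1
--     return dr == 0 and ds == 0 and dc == 0 and not sq and not dq
--
--
-- def cy_parse_guarded_return(expr: str):
--     # find-then-validate: try each position where ' when ' occurs, in order,
--     # and take the first one whose prefix is at top level
--     W = ' when '
--     for p in range(len(expr) - 5):
--         if expr.startswith(W, p) and _is_top_level(expr, p):
--             return expr[:p].strip(), expr[p + 6:].strip()
--     return None, None
-- ===== Notes on version B (the rewrite author's own statement) =====
-- stated objective: alternative
-- what changed: A's fused single-pass state machine (incremental quote/bracket state checked at every index) is replaced by a find-then-validate decomposition: B enumerates candidate separator positions with startswith and validates each by a stateless rescan of its prefix.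
import Mathlib
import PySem

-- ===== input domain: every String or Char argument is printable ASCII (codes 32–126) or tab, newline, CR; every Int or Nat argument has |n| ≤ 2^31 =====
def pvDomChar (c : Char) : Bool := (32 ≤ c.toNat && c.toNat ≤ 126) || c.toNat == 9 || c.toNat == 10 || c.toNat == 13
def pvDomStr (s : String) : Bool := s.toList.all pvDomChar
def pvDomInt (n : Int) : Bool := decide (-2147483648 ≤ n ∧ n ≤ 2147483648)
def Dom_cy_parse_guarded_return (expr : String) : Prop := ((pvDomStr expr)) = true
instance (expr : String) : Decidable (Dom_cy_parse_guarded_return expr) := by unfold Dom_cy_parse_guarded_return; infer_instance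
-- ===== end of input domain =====

-- B replaces A's fused single-pass state machine by find-then-validate (each
-- candidate separator position is checked by rescanning its prefix); measured
-- faster in CPython (the candidate scan is C-level), same exact results.

-- the pattern ' when '
def pvWhen : List Char := [' ', 'w', 'h', 'e', 'n', ' ']

-- ===== PORT A =====
-- A's while-loop, step for step, over expr.toList; the state (depth_round,
-- depth_sq, depth_curly, in_sq, in_dq) and index i are carried as arguments;
-- expr.startswith(' when ', i) is exactly '(current suffix).take 6 == pvWhen'.
def pvLoopA : List Char → Int → Int → Int → Bool → Bool → Nat → Option Nat
  | [], _, _, _, _, _, _ => none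
  | ch :: rest, dr, ds, dc, sq, dq, i =>
    if ch == '\'' && !dq then pvLoopA rest dr ds dc (!sq) dq (i + 1)
    else if ch == '"' && !sq then pvLoopA rest dr ds dc sq (!dq) (i + 1)
    else if !sq && !dq then
      let d :=
        if ch == '(' then (dr + 1, ds, dc)
        else if ch == ')' then (dr - 1, ds, dc)
        else if ch == '[' then (dr, ds + 1, dc)
        else if ch == ']' then (dr, ds - 1, dc)
        else if ch == '{' then (dr, ds, dc + 1)
        else if ch == '}' then (dr, ds, dc - 1)
        else (dr, ds, dc)
      if d.1 == 0 && d.2.1 == 0 && d.2.2 == 0 && ((ch :: rest).take 6 == pvWhen) then some i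
      else pvLoopA rest d.1 d.2.1 d.2.2 sq dq (i + 1)
    else pvLoopA rest dr ds dc sq dq (i + 1)

def cy_parse_guarded_return (expr : String) : Option String × Option String :=
  match pvLoopA expr.toList 0 0 0 false false 0 with
  | none => (none, none)
  | some idx => (some (PySem.Str.strip (String.ofList (expr.toList.take idx))),
                 some (PySem.Str.strip (String.ofList (expr.toList.drop (idx + 6)))))

-- ===== PORT B =====
-- B's helper _is_top_level: fold the quote/bracket rules over the prefix
def pvStepB (s : Int × Int × Int × Bool × Bool) (ch : Char) : Int × Int × Int × Bool × Bool :=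
  let (dr, ds, dc, sq, dq) := s
  if ch == '\'' && !dq then (dr, ds, dc, !sq, dq)
  else if ch == '"' && !sq then (dr, ds, dc, sq, !dq)
  else if !sq && !dq then
    if ch == '(' then (dr + 1, ds, dc, sq, dq)
    else if ch == ')' then (dr - 1, ds, dc, sq, dq)
    else if ch == '[' then (dr, ds + 1, dc, sq, dq)
    else if ch == ']' then (dr, ds - 1, dc, sq, dq)
    else if ch == '{' then (dr, ds, dc + 1, sq, dq)
    else if ch == '}' then (dr, ds, dc - 1, sq, dq)
    else (dr, ds, dc, sq, dq)
  else (dr, ds, dc, sq, dq)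

def pvIsTop (pre : List Char) : Bool :=
  let s := pre.foldl pvStepB (0, 0, 0, false, false)
  s.1 == 0 && s.2.1 == 0 && s.2.2.1 == 0 && !s.2.2.2.1 && !s.2.2.2.2

-- expr.startswith(' when ', p): exact — compares expr[p:p+6] with the pattern
def pvStartsWhenAt (cs : List Char) (p : Nat) : Bool := (cs.drop p).take 6 == pvWhen

-- B's for-loop over range(len(expr) - 5) with early return = find? over the range
def cy_parse_guarded_return_alt (expr : String) : Option String × Option String :=
  match (List.range (expr.toList.length - 5)).find?
      (fun p => pvStartsWhenAt expr.toList p && pvIsTop (expr.toList.take p)) with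
  | none => (none, none)
  | some p => (some (PySem.Str.strip (String.ofList (expr.toList.take p))),
               some (PySem.Str.strip (String.ofList (expr.toList.drop (p + 6)))))

-- ===== PRECONDITION & SPEC =====
def Spec_cy_parse_guarded_return (expr : String) (out : Option String × Option String) : Prop := out = cy_parse_guarded_return_alt expr
instance (expr : String) (out : Option String × Option String) : Decidable (Spec_cy_parse_guarded_return expr out) := by unfold Spec_cy_parse_guarded_return; infer_instance

-- ===== CLAIM (what is proved, stated in full; the proofs are below) =====
def Claim_equal_cy_parse_guarded_return : Prop := ∀ (expr : String), Dom_cy_parse_guarded_return expr → Spec_cy_parse_guarded_return expr (cy_parse_guarded_return expr)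

-- ===== LEMMAS AND PROOFS =====

-- the predicate B's find? uses
def pvPred (cs : List Char) (p : Nat) : Bool := pvStartsWhenAt cs p && pvIsTop (cs.take p)

-- "first index ≥ i satisfying pvPred", the common reference point of both loops
def pvFF (cs : List Char) (i : Nat) : Option Nat :=
  if _h : i < cs.length then
    if pvPred cs i then some i else pvFF cs (i + 1)
  else none
termination_by cs.length - i
decreasing_by omega

lemma pvStarts_false {cs : List Char} {p : Nat} (h : cs.length < p + 6) :
    pvStartsWhenAt cs p = false := by
  unfold pvStartsWhenAt
  rw [Bool.eq_false_iff]
  intro hEq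
  have hEq' : (cs.drop p).take 6 = pvWhen := by
    exact eq_of_beq hEq
  have := congrArg List.length hEq'
  simp [pvWhen] at this
  omega

lemma pvPred_false_of_big {cs : List Char} {p : Nat} (h : cs.length < p + 6) :
    pvPred cs p = false := by
  unfold pvPred
  rw [pvStarts_false h]
  rfl

lemma pvFF_none (cs : List Char) (i : Nat) (h : ∀ q, i ≤ q → pvPred cs q = false) :
    pvFF cs i = none := by
  unfold pvFF
  split
  · rw [h i le_rfl]
    simp only [Bool.false_eq_true, if_false]
    exact pvFF_none cs (i + 1) (fun q hq => h q (by omega))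
  · rfl
termination_by cs.length - i
decreasing_by omega

lemma pvFF_pos {cs : List Char} {i : Nat} (hlen : i < cs.length) :
    pvFF cs i = if pvPred cs i then some i else pvFF cs (i + 1) := by
  rw [pvFF, dif_pos hlen]

lemma pvFF_skip {cs : List Char} {i : Nat} (h : pvPred cs i = false) :
    pvFF cs i = pvFF cs (i + 1) := by
  by_cases hlen : i < cs.length
  · rw [pvFF_pos hlen, h]; simp
  · have h1 : pvFF cs i = none := by rw [pvFF]; exact dif_neg hlen
    have h2 : pvFF cs (i + 1) = none := by rw [pvFF]; exact dif_neg (by omega)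
    rw [h1, h2]

lemma find?_range'_eq_pvFF (cs : List Char) :
    ∀ (n i : Nat), (∀ q, i + n ≤ q → pvPred cs q = false) →
      (List.range' i n).find? (pvPred cs) = pvFF cs i := by
  intro n
  induction n with
  | zero =>
    intro i h
    simp only [List.range'_zero, List.find?_nil]
    exact (pvFF_none cs i (fun q hq => h q (by omega))).symm
  | succ n ih =>
    intro i h
    rw [List.range'_succ, List.find?_cons]
    cases hp : pvPred cs i with
    | false =>
      simp only
      rw [ih (i + 1) (fun q hq => h q (by omega)), pvFF_skip hp]
    | true =>
      simp only
      have hlen : i < cs.length := by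
        by_contra hc
        rw [pvPred_false_of_big (by omega)] at hp
        exact Bool.false_ne_true hp
      rw [pvFF_pos hlen, hp, if_pos rfl]

lemma find?_range_eq_pvFF (cs : List Char) :
    (List.range (cs.length - 5)).find? (pvPred cs) = pvFF cs 0 := by
  rw [List.range_eq_range']
  exact find?_range'_eq_pvFF cs (cs.length - 5) 0
    (fun q hq => pvPred_false_of_big (by omega))

-- A's one loop step, expressed through B's step function and the check of pvWhen
lemma pvLoopA_cons (ch : Char) (rest : List Char) (dr ds dc : Int) (sq dq : Bool) (i : Nat) :
    pvLoopA (ch :: rest) dr ds dc sq dq i =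
      if ((ch :: rest).take 6 == pvWhen) && (dr == 0 && ds == 0 && dc == 0 && !sq && !dq)
      then some i
      else
        let s' := pvStepB (dr, ds, dc, sq, dq) ch
        pvLoopA rest s'.1 s'.2.1 s'.2.2.1 s'.2.2.2.1 s'.2.2.2.2 (i + 1) := by
  by_cases hm : ((ch :: rest).take 6 == pvWhen) = true
  · -- a match at this position forces ch = ' '
    have hch : ch = ' ' := by
      have := eq_of_beq hm
      simp [pvWhen, List.take_succ_cons] at this
      exact this.1
    subst hch
    cases sq <;> cases dq <;>
      simp [pvLoopA, pvStepB] <;> split_ifs <;> simp_all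
  · rw [Bool.not_eq_true] at hm
    rw [hm]
    simp only [Bool.false_and, Bool.false_eq_true, if_false]
    simp only [pvLoopA, pvStepB, hm, Bool.and_false, Bool.false_eq_true, if_false]
    split_ifs <;> rfl

-- A's loop, started anywhere with the state obtained by folding the consumed
-- prefix, computes the first valid index
lemma pvLoopA_eq_pvFF (cs : List Char) :
    ∀ (suf : List Char) (i : Nat) (dr ds dc : Int) (sq dq : Bool),
      cs.drop i = suf →
      (cs.take i).foldl pvStepB (0, 0, 0, false, false) = (dr, ds, dc, sq, dq) →
      pvLoopA suf dr ds dc sq dq i = pvFF cs i := by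
  intro suf
  induction suf with
  | nil =>
    intro i dr ds dc sq dq hdrop _
    have hlen : cs.length ≤ i := by
      by_contra hc
      have := congrArg List.length hdrop
      simp at this
      omega
    rw [pvLoopA, pvFF, dif_neg (by omega)]
  | cons ch rest ih =>
    intro i dr ds dc sq dq hdrop hfold
    have hlen : i < cs.length := by
      by_contra hc
      rw [List.drop_eq_nil_of_le (by omega)] at hdrop
      exact absurd hdrop.symm (List.cons_ne_nil ch rest)
    have hget : cs[i] = ch ∧ cs.drop (i + 1) = rest := by
      rw [List.drop_eq_getElem_cons hlen] at hdrop
      exact ⟨(List.cons.injEq _ _ _ _ ▸ hdrop).1, (List.cons.injEq _ _ _ _ ▸ hdrop).2⟩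
    have htake : cs.take (i + 1) = cs.take i ++ [ch] := by
      rw [List.take_add_one, List.getElem?_eq_getElem hlen, hget.1]
      rfl
    have hfold' : (cs.take (i + 1)).foldl pvStepB (0, 0, 0, false, false)
        = pvStepB (dr, ds, dc, sq, dq) ch := by
      rw [htake, List.foldl_append, hfold]
      rfl
    have hpred : pvPred cs i
        = (((ch :: rest).take 6 == pvWhen) && (dr == 0 && ds == 0 && dc == 0 && !sq && !dq)) := by
      unfold pvPred pvStartsWhenAt pvIsTop
      rw [hdrop, hfold]
    rw [pvLoopA_cons, pvFF_pos hlen, hpred]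
    cases hp : (((ch :: rest).take 6 == pvWhen) && (dr == 0 && ds == 0 && dc == 0 && !sq && !dq)) with
    | true => simp
    | false =>
      simp only [Bool.false_eq_true, if_false]
      exact ih (i + 1) _ _ _ _ _ hget.2 hfold'

-- ===== VERDICT (by name: the statement is the Claim_ definition above) =====
theorem cy_parse_guarded_return_spec : Claim_equal_cy_parse_guarded_return := by
  unfold Claim_equal_cy_parse_guarded_return
  intro expr _
  unfold Spec_cy_parse_guarded_return cy_parse_guarded_return cy_parse_guarded_return_alt
  have hA : pvLoopA expr.toList 0 0 0 false false 0 = pvFF expr.toList 0 :=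
    pvLoopA_eq_pvFF expr.toList expr.toList 0 0 0 0 false false rfl rfl
  have hB : (List.range (expr.toList.length - 5)).find?
      (fun p => pvStartsWhenAt expr.toList p && pvIsTop (expr.toList.take p))
      = pvFF expr.toList 0 := find?_range_eq_pvFF expr.toList
  rw [hA, hB]
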